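-- pv_equiv track=rewrite | github.com/rudyluis/PROGDAEM | Python/PythonModelosEjercicios/Data_3_10-11-2024_ListasArchivocMAtrices/matrices/matriz_bordejp.py | matriz_borde
-- ===== SOURCE A (Python) =====
-- def matriz_borde(n):
--
--     matriz = [[0] * n for _ in range(n)]
--
--     numero = 1
--
--     for i in range(n):
--
--         matriz[0][i] = numero
--
--         numero += 1
--
--     for i in range(1, n):
--
--         matriz[i][n - 1] = numero
--
--         numero += 1
--
--     for i in range(n - 2, -1, -1):
--
--         matriz[n - 1][i] = numero
--
--         numero += 1
--
--     for i in range(n - 2, 0, -1):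
--
--         matriz[i][0] = numero
--
--         numero += 1
--
--     for i in range(1, n - 1):
--
--         for j in range(1, n - 1):
--
--             matriz[i][j] = numero
--
--             numero += 1
--     for i in range(1, n - 1):
--
--         for j in range(1, n - 1):
--
--             matriz[i][j] = 0
--
--     return matriz
-- ===== SOURCE B (Python) =====
-- def matriz_borde(n):
--     # Closed form: the value of each cell is computed directly; no mutation,
--     # no interior number-then-zero passes.
--     def val(i, j):
--         if j == 0 and 1 <= i <= n - 2:
--             return 4 * n - 3 - i
--         if i == n - 1 and j <= n - 2:
--             return 3 * n - 2 - j
--         if j == n - 1 and i >= 1: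
--             return n + i
--         if i == 0:
--             return j + 1
--         return 0
--     return [[val(i, j) for j in range(n)] for i in range(n)]
-- ===== Notes on version B (the rewrite author's own statement) =====
-- stated objective: simpler
-- what changed: Replaces A's five mutation loops (including a pass that numbers the whole interior and a second pass that re-zeroes it) by a per-cell closed-form formula used in a single nested comprehension.
import Mathlib
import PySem

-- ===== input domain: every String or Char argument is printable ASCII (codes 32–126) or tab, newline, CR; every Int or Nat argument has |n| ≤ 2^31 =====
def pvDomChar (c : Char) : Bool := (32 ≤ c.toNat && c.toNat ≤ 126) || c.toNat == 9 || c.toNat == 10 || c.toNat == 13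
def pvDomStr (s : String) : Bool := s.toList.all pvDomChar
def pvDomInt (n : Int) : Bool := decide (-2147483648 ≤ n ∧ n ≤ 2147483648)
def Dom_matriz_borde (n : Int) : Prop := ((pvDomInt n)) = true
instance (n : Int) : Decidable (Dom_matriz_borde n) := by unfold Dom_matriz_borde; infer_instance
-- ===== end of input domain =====

-- B replaces A's five mutation loops (including the pass that numbers the whole
-- interior and the pass that re-zeroes it) by a per-cell closed-form formula.

-- ===== PORT A =====
-- matriz[i][j] = v  (the indices A uses are always nonnegative and in range when the loops run)
def pvSet2 (m : List (List Int)) (i j : Nat) (v : Int) : List (List Int) :=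
  m.set i ((m.getD i []).set j v)

-- a Python 'for x in L: matriz[..] = numero; numero += 1' loop
def pvLoopSet (L : List Int) (pos : Int → Nat × Nat) (st : List (List Int) × Int) :
    List (List Int) × Int :=
  L.foldl (fun st x => (pvSet2 st.1 (pos x).1 (pos x).2 st.2, st.2 + 1)) st

-- a Python 'for x in L: matriz[..] = 0' loop
def pvLoopZero (L : List Int) (pos : Int → Nat × Nat) (m : List (List Int)) :
    List (List Int) :=
  L.foldl (fun m x => pvSet2 m (pos x).1 (pos x).2 0) m

def matriz_borde (n : Int) : List (List Int) :=
  let matriz := (PySem.List.pyRange 0 n 1).map (fun _ => List.replicate n.toNat 0)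
  let s1 := pvLoopSet (PySem.List.pyRange 0 n 1) (fun i => (0, i.toNat)) (matriz, 1)
  let s2 := pvLoopSet (PySem.List.pyRange 1 n 1) (fun i => (i.toNat, (n-1).toNat)) s1
  let s3 := pvLoopSet (PySem.List.pyRange (n-2) (-1) (-1)) (fun i => ((n-1).toNat, i.toNat)) s2
  let s4 := pvLoopSet (PySem.List.pyRange (n-2) 0 (-1)) (fun i => (i.toNat, 0)) s3
  let s5 := (PySem.List.pyRange 1 (n-1) 1).foldl
    (fun st i => pvLoopSet (PySem.List.pyRange 1 (n-1) 1) (fun j => (i.toNat, j.toNat)) st) s4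
  let s6 := (PySem.List.pyRange 1 (n-1) 1).foldl
    (fun m i => pvLoopZero (PySem.List.pyRange 1 (n-1) 1) (fun j => (i.toNat, j.toNat)) m) s5.1
  s6

-- ===== PORT B =====
def pvVal (n i j : Int) : Int :=
  if j = 0 ∧ 1 ≤ i ∧ i ≤ n - 2 then 4*n - 3 - i
  else if i = n - 1 ∧ j ≤ n - 2 then 3*n - 2 - j
  else if j = n - 1 ∧ 1 ≤ i then n + i
  else if i = 0 then j + 1
  else 0

def matriz_borde_alt (n : Int) : List (List Int) :=
  (PySem.List.pyRange 0 n 1).map (fun i => (PySem.List.pyRange 0 n 1).map (fun j => pvVal n i j))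

-- ===== PRECONDITION & SPEC =====
def Spec_matriz_borde (n : Int) (out : List (List Int)) : Prop := out = matriz_borde_alt n
instance (n : Int) (out : List (List Int)) : Decidable (Spec_matriz_borde n out) := by unfold Spec_matriz_borde; infer_instance

-- ===== CLAIM (what is proved, stated in full; the proofs are below) =====
def Claim_equal_matriz_borde : Prop := ∀ (n : Int), Dom_matriz_borde n → Spec_matriz_borde n (matriz_borde n)

-- ===== LEMMAS AND PROOFS =====

-- cell read (all reads we reason about are in range)
def getC (m : List (List Int)) (i j : Nat) : Int := (m.getD i []).getD j 0

-- the matrix is N×N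
def ShapeN (N : Nat) (m : List (List Int)) : Prop := m.length = N ∧ ∀ r ∈ m, r.length = N

lemma shape_set2 {N : Nat} {m : List (List Int)} (h : ShapeN N m) (a b : Nat) (v : Int) :
    ShapeN N (pvSet2 m a b v) := by
  by_cases ha : a < m.length
  · refine ⟨by simp [pvSet2, h.1], ?_⟩
    intro r hr
    rcases List.mem_or_eq_of_mem_set hr with h' | h'
    · exact h.2 r h'
    · subst h'
      rw [List.length_set, List.getD_eq_getElem _ _ ha]
      exact h.2 _ (List.getElem_mem ha)
  · rw [pvSet2, List.set_eq_of_length_le (by omega)]; exact h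

lemma getC_set2_eq {N : Nat} {m : List (List Int)} (h : ShapeN N m) {a b : Nat}
    (ha : a < N) (hb : b < N) (v : Int) : getC (pvSet2 m a b v) a b = v := by
  have ham : a < m.length := h.1 ▸ ha
  have hrow : (m.getD a []).length = N := by
    rw [List.getD_eq_getElem _ _ ham]; exact h.2 _ (List.getElem_mem ham)
  have hrow' : (m[a]?.getD []).length = N := by rw [← List.getD_eq_getElem?_getD]; exact hrow
  simp [getC, pvSet2, List.getD_eq_getElem?_getD, List.getElem?_set_self ham,
    List.getElem?_set_self (show b < (m[a]?.getD []).length from by omega)]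

lemma getC_set2_ne {m : List (List Int)} {a b i j : Nat} (hne : (i, j) ≠ (a, b)) (v : Int) :
    getC (pvSet2 m a b v) i j = getC m i j := by
  by_cases hia : i = a
  · subst hia
    have hjb : j ≠ b := by intro hh; exact hne (by rw [hh])
    by_cases ham : i < m.length
    · simp [getC, pvSet2, List.getD_eq_getElem?_getD, List.getElem?_set_self ham,
        List.getElem?_set_ne (Ne.symm hjb)]
    · rw [pvSet2, List.set_eq_of_length_le (by omega)]
  · simp [getC, pvSet2, List.getD_eq_getElem?_getD,
      List.getElem?_set_ne (show a ≠ i from fun hh => hia hh.symm)]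

lemma loopSet_counter (L : List Int) (pos : Int → Nat × Nat) (st : List (List Int) × Int) :
    (pvLoopSet L pos st).2 = st.2 + L.length := by
  induction L generalizing st with
  | nil => simp [pvLoopSet]
  | cons x xs ih =>
    rw [pvLoopSet, List.foldl_cons, ← pvLoopSet, ih]
    simp; omega

lemma shape_loopSet {N : Nat} (L : List Int) (pos : Int → Nat × Nat)
    (st : List (List Int) × Int) (h : ShapeN N st.1) : ShapeN N (pvLoopSet L pos st).1 := by
  induction L generalizing st with
  | nil => simpa [pvLoopSet]
  | cons x xs ih =>
    rw [pvLoopSet, List.foldl_cons, ← pvLoopSet]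
    exact ih _ (shape_set2 h _ _ _)

lemma shape_loopZero {N : Nat} (L : List Int) (pos : Int → Nat × Nat)
    (m : List (List Int)) (h : ShapeN N m) : ShapeN N (pvLoopZero L pos m) := by
  induction L generalizing m with
  | nil => simpa [pvLoopZero]
  | cons x xs ih =>
    rw [pvLoopZero, List.foldl_cons, ← pvLoopZero]
    exact ih _ (shape_set2 h _ _ _)

lemma getC_loopSet_untouched {L : List Int} {pos : Int → Nat × Nat} {i j : Nat}
    (h : ∀ x ∈ L, pos x ≠ (i, j)) (st : List (List Int) × Int) :
    getC (pvLoopSet L pos st).1 i j = getC st.1 i j := by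
  induction L generalizing st with
  | nil => simp [pvLoopSet]
  | cons x xs ih =>
    rw [pvLoopSet, List.foldl_cons, ← pvLoopSet,
      ih (fun y hy => h y (List.mem_cons_of_mem _ hy))]
    exact getC_set2_ne (fun hh => h x List.mem_cons_self (by simpa using hh.symm)) _

lemma getC_loopSet_last {N : Nat} {L L1 L2 : List Int} {x : Int} {pos : Int → Nat × Nat}
    {i j : Nat} {st : List (List Int) × Int} (hsh : ShapeN N st.1) (hi : i < N) (hj : j < N)
    (hL : L = L1 ++ x :: L2) (hx : pos x = (i, j)) (h2 : ∀ y ∈ L2, pos y ≠ (i, j)) :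
    getC (pvLoopSet L pos st).1 i j = st.2 + L1.length := by
  subst hL
  have hx1 : (pos x).1 = i := by rw [hx]
  have hx2 : (pos x).2 = j := by rw [hx]
  rw [pvLoopSet, List.foldl_append, List.foldl_cons, ← pvLoopSet, ← pvLoopSet,
    getC_loopSet_untouched h2, hx1, hx2]
  rw [show ((pvLoopSet L1 pos st).2 : Int) = st.2 + L1.length from loopSet_counter L1 pos st]
  exact getC_set2_eq (shape_loopSet L1 pos st hsh) hi hj _

lemma getC_loopZero_zero {N : Nat} {L : List Int} {pos : Int → Nat × Nat} {i j : Nat}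
    {m : List (List Int)} (hsh : ShapeN N m) (hi : i < N) (hj : j < N)
    (h : getC m i j = 0 ∨ ∃ x ∈ L, pos x = (i, j)) :
    getC (pvLoopZero L pos m) i j = 0 := by
  induction L generalizing m with
  | nil =>
    rcases h with h | ⟨x, hx, _⟩
    · simpa [pvLoopZero]
    · simp at hx
  | cons x xs ih =>
    rw [pvLoopZero, List.foldl_cons, ← pvLoopZero]
    refine ih (shape_set2 hsh _ _ _) ?_
    by_cases hpx : pos x = (i, j)
    · have h1 : (pos x).1 = i := by rw [hpx]
      have h2 : (pos x).2 = j := by rw [hpx]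
      left; rw [h1, h2]; exact getC_set2_eq hsh hi hj _
    · rcases h with h | ⟨y, hy, hpy⟩
      · left; rw [getC_set2_ne (fun hh => hpx hh.symm) _]; exact h
      · rcases List.mem_cons.mp hy with rfl | hy'
        · exact absurd hpy hpx
        · right; exact ⟨y, hy', hpy⟩

lemma shape_nestedSet {N : Nat} (Lo : List Int) (Li : Int → List Int)
    (posf : Int → Int → Nat × Nat) (st : List (List Int) × Int) (h : ShapeN N st.1) :
    ShapeN N ((Lo.foldl (fun st a => pvLoopSet (Li a) (posf a) st) st).1) := by
  induction Lo generalizing st with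
  | nil => simpa
  | cons a as ih => exact ih _ (shape_loopSet _ _ _ h)

lemma getC_nestedSet_untouched {Lo : List Int} {Li : Int → List Int}
    {posf : Int → Int → Nat × Nat} {i j : Nat}
    (h : ∀ a ∈ Lo, ∀ x ∈ Li a, posf a x ≠ (i, j)) (st : List (List Int) × Int) :
    getC ((Lo.foldl (fun st a => pvLoopSet (Li a) (posf a) st) st).1) i j = getC st.1 i j := by
  induction Lo generalizing st with
  | nil => simp
  | cons a as ih =>
    rw [List.foldl_cons, ih (fun b hb => h b (List.mem_cons_of_mem _ hb)),
      getC_loopSet_untouched (h a List.mem_cons_self) st]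

lemma getC_loopZero_untouched {L : List Int} {pos : Int → Nat × Nat} {i j : Nat}
    (h : ∀ x ∈ L, pos x ≠ (i, j)) (m : List (List Int)) :
    getC (pvLoopZero L pos m) i j = getC m i j := by
  induction L generalizing m with
  | nil => simp [pvLoopZero]
  | cons x xs ih =>
    rw [pvLoopZero, List.foldl_cons, ← pvLoopZero,
      ih (fun y hy => h y (List.mem_cons_of_mem _ hy))]
    exact getC_set2_ne (fun hh => h x List.mem_cons_self (by simpa using hh.symm)) _

lemma getC_nestedZero_untouched {Lo : List Int} {Li : Int → List Int}
    {posf : Int → Int → Nat × Nat} {i j : Nat}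
    (h : ∀ a ∈ Lo, ∀ x ∈ Li a, posf a x ≠ (i, j)) (m : List (List Int)) :
    getC (Lo.foldl (fun m a => pvLoopZero (Li a) (posf a) m) m) i j = getC m i j := by
  induction Lo generalizing m with
  | nil => simp
  | cons a as ih =>
    rw [List.foldl_cons, ih (fun b hb => h b (List.mem_cons_of_mem _ hb)),
      getC_loopZero_untouched (h a List.mem_cons_self) m]

lemma shape_nestedZero {N : Nat} (Lo : List Int) (Li : Int → List Int)
    (posf : Int → Int → Nat × Nat) (m : List (List Int)) (h : ShapeN N m) :
    ShapeN N (Lo.foldl (fun m a => pvLoopZero (Li a) (posf a) m) m) := by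
  induction Lo generalizing m with
  | nil => simpa
  | cons a as ih => exact ih _ (shape_loopZero _ _ _ h)

lemma getC_nestedZero_zero {N : Nat} {Lo : List Int} {Li : Int → List Int}
    {posf : Int → Int → Nat × Nat} {i j : Nat} {m : List (List Int)}
    (hsh : ShapeN N m) (hi : i < N) (hj : j < N)
    (h : getC m i j = 0 ∨ ∃ a ∈ Lo, ∃ x ∈ Li a, posf a x = (i, j)) :
    getC (Lo.foldl (fun m a => pvLoopZero (Li a) (posf a) m) m) i j = 0 := by
  induction Lo generalizing m with
  | nil =>
    rcases h with h | ⟨a, ha, _⟩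
    · simpa
    · simp at ha
  | cons a as ih =>
    rw [List.foldl_cons]
    refine ih (shape_loopZero _ _ _ hsh) ?_
    rcases h with h | ⟨b, hb, x, hx, hpx⟩
    · left; exact getC_loopZero_zero hsh hi hj (Or.inl h)
    · rcases List.mem_cons.mp hb with rfl | hb'
      · left; exact getC_loopZero_zero hsh hi hj (Or.inr ⟨x, hx, hpx⟩)
      · right; exact ⟨b, hb', x, hx, hpx⟩

-- split List.range at one index
lemma range_split (p M : Nat) (hp : p < M) :
    List.range M = List.range p ++ p :: ((List.range (M - p - 1)).map (fun k => p + 1 + k)) := by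
  conv_lhs => rw [show M = (p + 1) + (M - p - 1) from by omega]
  rw [List.range_add, List.range_succ]
  simp [List.append_assoc]

-- the first four loops of A, as one state
def pvStage4 (n : Int) : List (List Int) × Int :=
  pvLoopSet (PySem.List.pyRange (n-2) 0 (-1)) (fun i => (i.toNat, 0))
    (pvLoopSet (PySem.List.pyRange (n-2) (-1) (-1)) (fun i => ((n-1).toNat, i.toNat))
      (pvLoopSet (PySem.List.pyRange 1 n 1) (fun i => (i.toNat, (n-1).toNat))
        (pvLoopSet (PySem.List.pyRange 0 n 1) (fun i => (0, i.toNat))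
          ((PySem.List.pyRange 0 n 1).map (fun _ => List.replicate n.toNat 0), 1))))

lemma matriz_borde_def (n : Int) : matriz_borde n =
    (PySem.List.pyRange 1 (n-1) 1).foldl
      (fun m i => pvLoopZero (PySem.List.pyRange 1 (n-1) 1) (fun j => (i.toNat, j.toNat)) m)
      (((PySem.List.pyRange 1 (n-1) 1).foldl
        (fun st i => pvLoopSet (PySem.List.pyRange 1 (n-1) 1) (fun j => (i.toNat, j.toNat)) st)
        (pvStage4 n)).1) := rfl

theorem matriz_borde_eq_alt (n : Int) : matriz_borde n = matriz_borde_alt n := by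
  by_cases hn : n ≤ 0
  · have e0 : PySem.List.pyRange 0 n 1 = [] := PySem.List.pyRange_one_eq_nil hn
    have e1 : PySem.List.pyRange 1 n 1 = [] := PySem.List.pyRange_one_eq_nil (by omega)
    have e2 : PySem.List.pyRange (n-2) (-1) (-1) = [] := PySem.List.pyRange_neg_one_eq_nil (by omega)
    have e3 : PySem.List.pyRange (n-2) 0 (-1) = [] := PySem.List.pyRange_neg_one_eq_nil (by omega)
    have e4 : PySem.List.pyRange 1 (n-1) 1 = [] := PySem.List.pyRange_one_eq_nil (by omega)
    simp [matriz_borde, matriz_borde_alt, pvLoopSet, pvLoopZero, e0, e1, e2, e3, e4]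
  · have hn : 0 < n := by omega
    set N := n.toNat with hNdef
    have hN1 : 1 ≤ N := by omega
    have len0 : (PySem.List.pyRange 0 n 1).length = N := by
      rw [PySem.List.length_pyRange_one]; omega
    have len1 : (PySem.List.pyRange 1 n 1).length = N - 1 := by
      rw [PySem.List.length_pyRange_one]; omega
    have len3 : (PySem.List.pyRange (n-2) (-1) (-1)).length = N - 1 := by
      rw [PySem.List.length_pyRange_neg_one]; omega
    have sh0 : ShapeN N ((PySem.List.pyRange 0 n 1).map (fun _ => List.replicate n.toNat 0)) := by
      refine ⟨by simp [len0], ?_⟩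
      intro r hr
      rcases List.mem_map.mp hr with ⟨x, _, rfl⟩
      simp [hNdef]
    have sh1 : ShapeN N (pvLoopSet (PySem.List.pyRange 0 n 1) (fun i => (0, i.toNat))
        ((PySem.List.pyRange 0 n 1).map (fun _ => List.replicate n.toNat 0), 1)).1 :=
      shape_loopSet _ _ _ sh0
    have sh2 : ShapeN N (pvLoopSet (PySem.List.pyRange 1 n 1) (fun i => (i.toNat, (n-1).toNat))
        (pvLoopSet (PySem.List.pyRange 0 n 1) (fun i => (0, i.toNat))
          ((PySem.List.pyRange 0 n 1).map (fun _ => List.replicate n.toNat 0), 1))).1 :=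
      shape_loopSet _ _ _ sh1
    have sh3 : ShapeN N (pvLoopSet (PySem.List.pyRange (n-2) (-1) (-1))
        (fun i => ((n-1).toNat, i.toNat))
        (pvLoopSet (PySem.List.pyRange 1 n 1) (fun i => (i.toNat, (n-1).toNat))
          (pvLoopSet (PySem.List.pyRange 0 n 1) (fun i => (0, i.toNat))
            ((PySem.List.pyRange 0 n 1).map (fun _ => List.replicate n.toNat 0), 1)))).1 :=
      shape_loopSet _ _ _ sh2
    have sh4 : ShapeN N (pvStage4 n).1 := shape_loopSet _ _ _ sh3
    have sh5 : ShapeN N (((PySem.List.pyRange 1 (n-1) 1).foldl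
        (fun st i => pvLoopSet (PySem.List.pyRange 1 (n-1) 1) (fun j => (i.toNat, j.toNat)) st)
        (pvStage4 n)).1) := shape_nestedSet _ _ _ _ sh4
    have shF : ShapeN N (matriz_borde n) := by
      rw [matriz_borde_def]; exact shape_nestedZero _ _ _ _ sh5
    have p2 : (((PySem.List.pyRange 0 n 1).map (fun _ => List.replicate n.toNat 0),
        (1 : Int)) : List (List Int) × Int).2 = 1 := rfl
    have c1 : (pvLoopSet (PySem.List.pyRange 0 n 1) (fun i => (0, i.toNat))
        ((PySem.List.pyRange 0 n 1).map (fun _ => List.replicate n.toNat 0), 1)).2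
        = 1 + (N : Int) := by
      rw [loopSet_counter, len0, p2]
    have c2 : (pvLoopSet (PySem.List.pyRange 1 n 1) (fun i => (i.toNat, (n-1).toNat))
        (pvLoopSet (PySem.List.pyRange 0 n 1) (fun i => (0, i.toNat))
          ((PySem.List.pyRange 0 n 1).map (fun _ => List.replicate n.toNat 0), 1))).2
        = 2 * (N : Int) := by
      rw [loopSet_counter, len1, c1]; omega
    have c3 : (pvLoopSet (PySem.List.pyRange (n-2) (-1) (-1))
        (fun i => ((n-1).toNat, i.toNat))
        (pvLoopSet (PySem.List.pyRange 1 n 1) (fun i => (i.toNat, (n-1).toNat))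
          (pvLoopSet (PySem.List.pyRange 0 n 1) (fun i => (0, i.toNat))
            ((PySem.List.pyRange 0 n 1).map (fun _ => List.replicate n.toNat 0), 1)))).2
        = 3 * (N : Int) - 1 := by
      rw [loopSet_counter, len3, c2]; omega
    have key : ∀ i j : Nat, i < N → j < N → getC (matriz_borde n) i j = pvVal n i j := by
      intro i j hi hj
      rw [matriz_borde_def]
      by_cases hi0 : i = 0
      · -- top row: set by loop 1, untouched afterwards
        subst hi0
        have hsplit : PySem.List.pyRange 0 n 1
            = List.map (fun k : Nat => (0 : Int) + (k : Int)) (List.range j)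
              ++ ((0 : Int) + (j : Int))
              :: List.map ((fun k : Nat => (0 : Int) + (k : Int)) ∘ (fun k => j + 1 + k))
                  (List.range (N - j - 1)) := by
          rw [PySem.List.pyRange_one, show (n - 0).toNat = N from by omega, range_split j N hj,
            List.map_append, List.map_cons, List.map_map]
        rw [getC_nestedZero_untouched (fun a ha x hx => by
              rw [PySem.List.mem_pyRange_one] at ha hx
              intro h'; simp only [Prod.mk.injEq] at h'; omega) _,
            getC_nestedSet_untouched (fun a ha x hx => by
              rw [PySem.List.mem_pyRange_one] at ha hx
              intro h'; simp only [Prod.mk.injEq] at h'; omega) _,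
            pvStage4,
            getC_loopSet_untouched (fun x hx => by
              rw [PySem.List.mem_pyRange_neg_one] at hx
              intro h'; simp only [Prod.mk.injEq] at h'; omega) _,
            getC_loopSet_untouched (fun x hx => by
              rw [PySem.List.mem_pyRange_neg_one] at hx
              intro h'; simp only [Prod.mk.injEq] at h'; omega) _,
            getC_loopSet_untouched (fun x hx => by
              rw [PySem.List.mem_pyRange_one] at hx
              intro h'; simp only [Prod.mk.injEq] at h'; omega) _,
            getC_loopSet_last sh0 (by omega) hj hsplit
              (by simp only [Prod.mk.injEq]; constructor <;> first | trivial | omega)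
              (fun y hy => by
                rcases List.mem_map.mp hy with ⟨k, hk, rfl⟩
                simp only [List.mem_range] at hk
                intro h'; simp only [Function.comp_apply, Prod.mk.injEq] at h'; omega),
            p2]
        simp only [List.length_map, List.length_range, pvVal]
        split_ifs <;> omega
      · by_cases hjN : j = N - 1
        · -- right column with i ≥ 1: set by loop 2, untouched afterwards
          subst hjN
          have hsplit : PySem.List.pyRange 1 n 1
              = List.map (fun k : Nat => (1 : Int) + (k : Int)) (List.range (i - 1))
                ++ ((1 : Int) + ((i - 1 : Nat) : Int))
                :: List.map ((fun k : Nat => (1 : Int) + (k : Int)) ∘ (fun k => (i - 1) + 1 + k))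
                    (List.range ((N - 1) - (i - 1) - 1)) := by
            rw [PySem.List.pyRange_one, show (n - 1).toNat = N - 1 from by omega,
              range_split (i - 1) (N - 1) (by omega), List.map_append, List.map_cons,
              List.map_map]
          rw [getC_nestedZero_untouched (fun a ha x hx => by
                rw [PySem.List.mem_pyRange_one] at ha hx
                intro h'; simp only [Prod.mk.injEq] at h'; omega) _,
              getC_nestedSet_untouched (fun a ha x hx => by
                rw [PySem.List.mem_pyRange_one] at ha hx
                intro h'; simp only [Prod.mk.injEq] at h'; omega) _,
              pvStage4,
              getC_loopSet_untouched (fun x hx => by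
                rw [PySem.List.mem_pyRange_neg_one] at hx
                intro h'; simp only [Prod.mk.injEq] at h'; omega) _,
              getC_loopSet_untouched (fun x hx => by
                rw [PySem.List.mem_pyRange_neg_one] at hx
                intro h'; simp only [Prod.mk.injEq] at h'; omega) _,
              getC_loopSet_last sh1 hi (by omega) hsplit
                (by simp only [Prod.mk.injEq]; constructor <;> first | trivial | omega)
                (fun y hy => by
                  rcases List.mem_map.mp hy with ⟨k, hk, rfl⟩
                  simp only [List.mem_range] at hk
                  intro h'; simp only [Function.comp_apply, Prod.mk.injEq] at h'; omega),
              c1]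
          simp only [List.length_map, List.length_range, pvVal]
          split_ifs <;> omega
        · by_cases hiN : i = N - 1
          · -- bottom row with j ≤ N-2: set by loop 3, untouched afterwards
            subst hiN
            have hsplit : PySem.List.pyRange (n-2) (-1) (-1)
                = List.map (fun k : Nat => (n - 2) - (k : Int)) (List.range (N - 2 - j))
                  ++ ((n - 2) - ((N - 2 - j : Nat) : Int))
                  :: List.map ((fun k : Nat => (n - 2) - (k : Int)) ∘ (fun k => (N - 2 - j) + 1 + k))
                      (List.range ((N - 1) - (N - 2 - j) - 1)) := by
              rw [PySem.List.pyRange_neg_one, show ((n - 2) - (-1)).toNat = N - 1 from by omega,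
                range_split (N - 2 - j) (N - 1) (by omega), List.map_append, List.map_cons,
                List.map_map]
            rw [getC_nestedZero_untouched (fun a ha x hx => by
                  rw [PySem.List.mem_pyRange_one] at ha hx
                  intro h'; simp only [Prod.mk.injEq] at h'; omega) _,
                getC_nestedSet_untouched (fun a ha x hx => by
                  rw [PySem.List.mem_pyRange_one] at ha hx
                  intro h'; simp only [Prod.mk.injEq] at h'; omega) _,
                pvStage4,
                getC_loopSet_untouched (fun x hx => by
                  rw [PySem.List.mem_pyRange_neg_one] at hx
                  intro h'; simp only [Prod.mk.injEq] at h'; omega) _,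
                getC_loopSet_last sh2 (by omega) hj hsplit
                  (by simp only [Prod.mk.injEq]; constructor <;> first | trivial | omega)
                  (fun y hy => by
                    rcases List.mem_map.mp hy with ⟨k, hk, rfl⟩
                    simp only [List.mem_range] at hk
                    intro h'; simp only [Function.comp_apply, Prod.mk.injEq] at h'; omega),
                c2]
            simp only [List.length_map, List.length_range, pvVal]
            split_ifs <;> omega
          · by_cases hj0 : j = 0
            · -- left column with 1 ≤ i ≤ N-2: set by loop 4, untouched afterwards
              subst hj0
              have hsplit : PySem.List.pyRange (n-2) 0 (-1)
                  = List.map (fun k : Nat => (n - 2) - (k : Int)) (List.range (N - 2 - i))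
                    ++ ((n - 2) - ((N - 2 - i : Nat) : Int))
                    :: List.map ((fun k : Nat => (n - 2) - (k : Int)) ∘ (fun k => (N - 2 - i) + 1 + k))
                        (List.range ((N - 2) - (N - 2 - i) - 1)) := by
                rw [PySem.List.pyRange_neg_one, show ((n - 2) - 0).toNat = N - 2 from by omega,
                  range_split (N - 2 - i) (N - 2) (by omega), List.map_append, List.map_cons,
                  List.map_map]
              rw [getC_nestedZero_untouched (fun a ha x hx => by
                    rw [PySem.List.mem_pyRange_one] at ha hx
                    intro h'; simp only [Prod.mk.injEq] at h'; omega) _,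
                  getC_nestedSet_untouched (fun a ha x hx => by
                    rw [PySem.List.mem_pyRange_one] at ha hx
                    intro h'; simp only [Prod.mk.injEq] at h'; omega) _,
                  pvStage4,
                  getC_loopSet_last sh3 hi (by omega) hsplit
                    (by simp only [Prod.mk.injEq]; constructor <;> first | trivial | omega)
                    (fun y hy => by
                      rcases List.mem_map.mp hy with ⟨k, hk, rfl⟩
                      simp only [List.mem_range] at hk
                      intro h'; simp only [Function.comp_apply, Prod.mk.injEq] at h'; omega),
                  c3]
              simp only [List.length_map, List.length_range, pvVal]
              split_ifs <;> omega
            · -- interior cell: zeroed by the last loop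
              rw [getC_nestedZero_zero sh5 hi hj
                  (Or.inr ⟨(i : Int), by rw [PySem.List.mem_pyRange_one]; omega,
                    (j : Int), by rw [PySem.List.mem_pyRange_one]; omega,
                    by simp only [Prod.mk.injEq]; constructor <;> first | trivial | omega⟩)]
              simp only [pvVal]
              split_ifs <;> omega
    refine List.ext_getElem ?_ ?_
    · rw [shF.1]; simp [matriz_borde_alt, len0]
    · intro i h1 h2
      have hiN : i < N := by rw [← shF.1]; exact h1
      have hrowlen : (matriz_borde n)[i].length = N := shF.2 _ (List.getElem_mem h1)
      refine List.ext_getElem ?_ ?_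
      · rw [hrowlen]; simp [matriz_borde_alt, len0]
      · intro j hj1 hj2
        have hjN : j < N := by rw [← hrowlen]; exact hj1
        have hA : (matriz_borde n)[i][j] = getC (matriz_borde n) i j := by
          rw [getC, List.getD_eq_getElem _ _ h1, List.getD_eq_getElem _ _ hj1]
        rw [hA, key i j hiN hjN]
        simp [matriz_borde_alt, PySem.List.getElem_pyRange_one]

-- ===== VERDICT (by name: the statement is the Claim_ definition above) =====
theorem matriz_borde_spec : Claim_equal_matriz_borde := by
  intro n _
  unfold Spec_matriz_borde
  exact matriz_borde_eq_alt n
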